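-- pv_equiv track=rewrite | github.com/miliar/Code_Jam_Webscraper | solutions_python/Problem_201/1838.py | marcaFin
-- ===== SOURCE A (Python) =====
-- def marcaFin(n):
--     ainit=0
--     init=0
--     final=0
--     for x in range(len(n)):
--         if n[x]=='1':
--             if x-ainit>final-init:
--                 init=ainit
--                 final=x
--             ainit=x
--     y=final-init-2
--     return y
-- ===== SOURCE B (Python) =====
-- def marcaFin(n):
--     # Split on '1': the pieces are the zero-runs between the '1' markers.
--     parts = n.split('1')
--     if len(parts) == 1:          # no '1' at all
--         return -2
--     best = len(parts[0])         # first '1' measured from the string start (A's ainit=0 seed)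
--     for seg in parts[1:-1]:      # each inner zero-run gives a gap of (run length + 1)
--         if len(seg) + 1 > best:
--             best = len(seg) + 1
--     return best - 2
-- ===== Notes on version B (the rewrite author's own statement) =====
-- stated objective: faster
-- what changed: Replaces A's character-by-character scan with running state (ainit, init, final) by splitting the string on '1' and taking the max over the zero-run lengths between the markers (first piece as-is, inner pieces + 1), minus 2.
import Mathlib
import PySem

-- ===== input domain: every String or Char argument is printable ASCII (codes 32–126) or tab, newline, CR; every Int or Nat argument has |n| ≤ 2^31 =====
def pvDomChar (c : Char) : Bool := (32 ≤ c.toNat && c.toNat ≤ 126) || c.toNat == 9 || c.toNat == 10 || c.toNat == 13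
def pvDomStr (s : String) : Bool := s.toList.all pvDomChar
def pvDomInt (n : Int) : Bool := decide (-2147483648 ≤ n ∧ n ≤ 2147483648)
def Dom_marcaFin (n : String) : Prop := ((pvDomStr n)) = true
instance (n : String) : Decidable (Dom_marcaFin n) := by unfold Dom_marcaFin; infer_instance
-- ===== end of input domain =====

-- B replaces A's character-by-character running-max scan (state ainit/init/final) by
-- splitting the string on '1' and maxing over the zero-run lengths.  Objective: faster
-- (measured constant-factor speedup; same O(n)).

-- ===== PORT A =====
-- loop body of A's for-loop (the '1' branch updates init/final when the gap grows, then sets ainit = x)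
def pvStepA (st : Int × Int × Int) (x : Int) : Int × Int × Int :=
  let (ainit, init, final) := st
  if x - ainit > final - init then (x, ainit, x) else (x, init, final)

-- n[x] is always in range for x ∈ range(len(n)), so pyGetD with a dummy default is exact here
def marcaFin (n : String) : Int :=
  let cs := n.toList
  let st :=
    (PySem.List.pyRange 0 (cs.length : Int) 1).foldl
      (fun (st : Int × Int × Int) x =>
        if (PySem.List.pyGetD cs x ' ' == '1') = true then pvStepA st x else st)
      (0, 0, 0)
  st.2.2 - st.2.1 - 2

-- ===== PORT B =====
-- n.split('1') is ported as List.splitOn '1' on the character list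
def marcaFin_alt (n : String) : Int :=
  let parts := n.toList.splitOn '1'
  if parts.length == 1 then -2
  else
    ((parts.drop 1).dropLast.foldl
        (fun (b : Int) (seg : List Char) =>
          if ((seg.length : Int) + 1 > b) then (seg.length : Int) + 1 else b)
        (parts.headI.length : Int)) - 2

-- ===== PRECONDITION & SPEC =====
def Spec_marcaFin (n : String) (out : Int) : Prop := out = marcaFin_alt n
instance (n : String) (out : Int) : Decidable (Spec_marcaFin n out) := by unfold Spec_marcaFin; infer_instance

-- ===== CLAIM (what is proved, stated in full; the proofs are below) =====
def Claim_equal_marcaFin : Prop := ∀ (n : String), Dom_marcaFin n → Spec_marcaFin n (marcaFin n)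

-- ===== LEMMAS AND PROOFS =====

-- a conditional fold over a list is the plain fold over the mapped filter
theorem pv_foldl_ite_filter_map {α σ : Type} (P : α → Bool) (f : α → Int) (g : σ → Int → σ) :
    ∀ (l : List α) (s : σ),
      l.foldl (fun s a => if P a = true then g s (f a) else s) s
        = (((l.filter P).map f).foldl g s) := by
  intro l
  induction l with
  | nil => intro s; rfl
  | cons x t ih =>
    intro s
    by_cases h : P x
    · simp [List.foldl, List.filter, h, ih]
    · simp [List.foldl, List.filter, h, ih]

-- the running final-init of A's loop is the running max of adjacent gaps of a :: l
theorem pv_key : ∀ (l : List Int) (a i f : Int),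
    (l.foldl pvStepA (a, i, f)).2.2 - (l.foldl pvStepA (a, i, f)).2.1
      = (((a :: l).zip l).map (fun p => p.2 - p.1)).foldl max (f - i) := by
  intro l
  induction l with
  | nil => intro a i f; simp
  | cons x t ih =>
    intro a i f
    show (t.foldl pvStepA (pvStepA (a, i, f) x)).2.2
           - (t.foldl pvStepA (pvStepA (a, i, f) x)).2.1
         = (((x :: t).zip t).map (fun p => p.2 - p.1)).foldl max (max (f - i) (x - a))
    by_cases h : x - a > f - i
    · rw [show pvStepA (a, i, f) x = (x, a, x) from by simp [pvStepA, h]]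
      rw [ih]
      congr 1
      omega
    · rw [show pvStepA (a, i, f) x = (x, i, f) from by simp [pvStepA, h]]
      rw [ih]
      congr 1
      omega

-- positions of the '1's, written as a structural recursion with a running offset
def pvOnes (s : Int) : List Char → List Int
  | [] => []
  | c :: t => if c == '1' then s :: pvOnes (s + 1) t else pvOnes (s + 1) t

-- right-fold spec: (distance to the first '1' — or length if none —, max inner gap if any '1')
def pvG : List Char → Int × Option Int
  | [] => (0, none)
  | c :: t =>
    let p := pvG t
    if c == '1' then (0, some (match p.2 with | none => 0 | some m => max m (p.1 + 1)))
    else (p.1 + 1, p.2)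

theorem pvOnes_eq : ∀ (cs : List Char) (s : Int),
    ((PySem.List.enumerate cs s).filter (fun p => p.2 == '1')).map
        (fun p : Int × Char => p.1) = pvOnes s cs := by
  intro cs
  induction cs with
  | nil => intro s; simp [pvOnes, PySem.List.enumerate_nil]
  | cons c t ih =>
    intro s
    rw [PySem.List.enumerate_cons]
    by_cases h : c == '1'
    · simp [List.filter, h, pvOnes, ih]
    · simp [List.filter, h, pvOnes, ih]

theorem pv_foldl_max : ∀ (l : List Int) (a b : Int),
    l.foldl max (max a b) = max a (l.foldl max b) := by
  intro l
  induction l with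
  | nil => intro a b; rfl
  | cons x t ih =>
    intro a b
    simp only [List.foldl_cons]
    rw [max_assoc, ih]

theorem pvG_fst_nonneg : ∀ cs : List Char, 0 ≤ (pvG cs).1 := by
  intro cs
  induction cs with
  | nil => simp [pvG]
  | cons c t ih =>
    by_cases h : c == '1' <;> simp [pvG, h] <;> omega

-- A's folded max over the gaps of (a :: ones) equals the pvG spec
theorem pv_A_G : ∀ (cs : List Char) (a s : Int),
    (((a :: pvOnes s cs).zip (pvOnes s cs)).map (fun p => p.2 - p.1)).foldl max 0
      = match (pvG cs).2 with
        | none => 0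
        | some m => max ((pvG cs).1 + (s - a)) m := by
  intro cs
  induction cs with
  | nil => intro a s; simp [pvOnes, pvG]
  | cons c t ih =>
    intro a s
    by_cases h : c == '1'
    · simp only [pvOnes, pvG, h, if_pos]
      simp only [List.zip_cons_cons, List.map_cons, List.foldl_cons]
      rw [max_comm 0 (s - a), pv_foldl_max, ih]
      rcases hmatch : (pvG t).2 with _ | m
      · dsimp only; norm_num
      · dsimp only
        norm_num
        congr 1
        exact max_comm _ _
    · simp only [pvOnes, pvG, h, Bool.false_eq_true, if_false]
      rw [ih]
      rcases hmatch : (pvG t).2 with _ | m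
      · dsimp only
      · dsimp only
        congr 1
        ring

-- B's split pieces, measured against the pvG spec
theorem pv_B_G : ∀ (cs : List Char),
    match (pvG cs).2 with
    | none => (cs.splitOnP (fun c => c == '1')).length = 1
    | some m =>
        (cs.splitOnP (fun c => c == '1')).length ≠ 1 ∧
        (((cs.splitOnP (fun c => c == '1')).headI.length : Int) = (pvG cs).1) ∧
        ∀ a : Int, 0 ≤ a →
          (((cs.splitOnP (fun c => c == '1')).drop 1).dropLast.foldl
              (fun (b : Int) (seg : List Char) =>
                if ((seg.length : Int) + 1 > b) then (seg.length : Int) + 1 else b) a)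
            = max a m := by
  intro cs
  induction cs with
  | nil => simp [pvG]
  | cons c t ih =>
    obtain ⟨pt0, ptrest, hpt⟩ :=
      List.exists_cons_of_ne_nil (List.splitOnP_ne_nil (fun c => c == '1') t)
    by_cases h : c == '1'
    · simp only [pvG, h, if_pos]
      rw [List.splitOnP_cons, if_pos h]
      rcases hmatch : (pvG t).2 with _ | m
      · -- t has no '1': split of t is a single piece
        have hlen1 : (t.splitOnP (fun c => c == '1')).length = 1 := by
          have := ih; rw [hmatch] at this; exact this
        rw [hpt] at hlen1
        have hrest : ptrest = [] := by simpa using hlen1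
        refine ⟨by rw [hpt]; simp only [List.length_cons]; omega, by simp, ?_⟩
        intro a ha
        rw [hpt, hrest]
        simp only [List.drop_succ_cons, List.drop_zero]
        simp only [show ([pt0] : List (List Char)).dropLast = [] from by simp,
          List.foldl_nil]
        simp only [max_def]
        split_ifs <;> omega
      · -- t has a '1': IH gives the inner-fold characterisation
        have hih := ih; rw [hmatch] at hih
        obtain ⟨hne1, hhead, hfold⟩ := hih
        have hrest_ne : ptrest ≠ [] := by
          intro hnil
          apply hne1
          rw [hpt, hnil]
          rfl
        refine ⟨by rw [hpt]; simp only [List.length_cons]; omega, by simp, ?_⟩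
        intro a ha
        rw [hpt]
        simp only [List.drop_succ_cons, List.drop_zero]
        rw [List.dropLast_cons_of_ne_nil hrest_ne, List.foldl_cons]
        have hd : ((pt0.length : Int)) = (pvG t).1 := by
          rw [hpt] at hhead; simpa using hhead
        have hstep :
            (if ((pt0.length : Int) + 1 > a) then (pt0.length : Int) + 1 else a)
              = max a ((pvG t).1 + 1) := by
          rw [← hd]
          simp only [max_def]
          split_ifs <;> omega
        rw [hstep]
        have hfold' := hfold (max a ((pvG t).1 + 1)) (by omega)
        rw [hpt] at hfold'
        simp only [List.drop_succ_cons, List.drop_zero] at hfold'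
        rw [hfold']
        simp only [max_def]
        split_ifs <;> omega
    · simp only [pvG, h, Bool.false_eq_true, if_false]
      rw [List.splitOnP_cons, if_neg (by simpa using h)]
      rcases hmatch : (pvG t).2 with _ | m
      · have hlen1 : (t.splitOnP (fun c => c == '1')).length = 1 := by
          have := ih; rw [hmatch] at this; exact this
        simpa using hlen1
      · have hih := ih; rw [hmatch] at hih
        obtain ⟨hne1, hhead, hfold⟩ := hih
        rw [hpt] at hne1 hhead hfold ⊢
        simp only [List.modifyHead_cons, List.length_cons, List.headI_cons,
          List.drop_succ_cons, List.drop_zero] at hne1 hhead hfold ⊢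
        refine ⟨by omega, ?_, hfold⟩
        push_cast
        omega

theorem pv_main (n : String) : marcaFin n = marcaFin_alt n := by
  have hA :
      (PySem.List.pyRange 0 (n.toList.length : Int) 1).foldl
        (fun (st : Int × Int × Int) x =>
          if (PySem.List.pyGetD n.toList x ' ' == '1') = true then pvStepA st x else st)
        (0, 0, 0)
      = (((PySem.List.enumerate n.toList).filter (fun p => p.2 == '1')).map
          (fun p : Int × Char => p.1)).foldl pvStepA (0, 0, 0) := by
    rw [← pv_foldl_ite_filter_map (fun p : Int × Char => p.2 == '1')
        (fun p : Int × Char => p.1) pvStepA]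
    rw [PySem.List.enumerate_eq_map_pyRange (xs := n.toList) (d := ' '), List.foldl_map]
    simp [PySem.List.len]
  have hsplit : n.toList.splitOn '1' = n.toList.splitOnP (fun c => c == '1') := rfl
  unfold marcaFin marcaFin_alt
  dsimp only
  rw [hA, pvOnes_eq n.toList 0, pv_key, show (0:Int) - 0 = 0 from by norm_num,
      pv_A_G n.toList 0 0, hsplit]
  have hB := pv_B_G n.toList
  rcases hmatch : (pvG n.toList).2 with _ | m
  · rw [hmatch] at hB
    simp [hB]
  · rw [hmatch] at hB
    obtain ⟨hne1, hhead, hfold⟩ := hB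
    rw [if_neg (by simpa using hne1)]
    rw [hfold _ (by rw [hhead]; exact pvG_fst_nonneg n.toList), hhead]
    dsimp only; norm_num

-- ===== VERDICT (by name: the statement is the Claim_ definition above) =====
theorem marcaFin_spec : Claim_equal_marcaFin := by
  intro n _
  unfold Spec_marcaFin
  exact pv_main n
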